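-- pv_equiv track=rewrite | github.com/Sad-Programmist/Tasks | task 1/task_1.py | progression
-- ===== SOURCE A (Python) =====
-- def progression(a):
--     min_quantity = len(a)
--     min_dif = 0
--     min_a1 = 0
--     for i in range(len(a) - 1):
--         quantity = 0
--         dif = a[i + 1] - a[i]
--         for j in range(len(a)):
--             if a[j] != a[i] + dif * (j - i):
--                 quantity += 1
--         if quantity < min_quantity:
--             min_quantity = quantity
--             min_dif = dif
--             min_a1 = a[i] - dif * i
--     return list(range(min_a1, min_a1 + min_dif * len(a), min_dif))
-- ===== SOURCE B (Python) =====
-- def progression(a):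
--     n = len(a)
--     # index phase: for each distinct consecutive slope d, a frequency table of
--     # intercepts a[j] - d*j, built by one counting pass -- no per-candidate scan
--     slopes = {a[i + 1] - a[i] for i in range(n - 1)}
--     freq = {}
--     for d in slopes:
--         cnt = {}
--         for j, x in enumerate(a):
--             b = x - d * j
--             cnt[b] = cnt.get(b, 0) + 1
--         freq[d] = cnt
--     # selection phase: builtin min picks the first index with the fewest mismatches
--     i = min(range(n - 1),
--             key=lambda i: n - freq[a[i + 1] - a[i]][a[i] - (a[i + 1] - a[i]) * i])
--     d = a[i + 1] - a[i]
--     b = a[i] - d * i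
--     return list(range(b, b + d * n, d))
-- ===== Notes on version B (the rewrite author's own statement) =====
-- stated objective: faster
-- what changed: A rescans the whole list per candidate to count mismatches and tracks the best with an explicit running-min accumulator; B first builds, for each distinct consecutive slope d, a frequency table of the intercepts a[j]-d*j by a counting pass, so the per-candidate inner mismatch scan disappears into one O(1) table lookup, and selects the winning candidate with the builtin min(range, key=...).
import Mathlib
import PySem

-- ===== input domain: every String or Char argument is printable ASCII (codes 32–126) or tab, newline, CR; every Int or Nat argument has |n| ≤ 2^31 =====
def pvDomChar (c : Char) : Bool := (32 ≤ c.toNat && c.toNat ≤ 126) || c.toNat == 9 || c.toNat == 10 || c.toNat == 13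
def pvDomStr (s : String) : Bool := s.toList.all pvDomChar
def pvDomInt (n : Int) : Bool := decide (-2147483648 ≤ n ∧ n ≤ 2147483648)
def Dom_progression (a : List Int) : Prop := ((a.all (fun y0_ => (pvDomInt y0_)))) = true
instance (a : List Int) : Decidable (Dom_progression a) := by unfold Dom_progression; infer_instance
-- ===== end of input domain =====

-- B replaces A's per-candidate mismatch rescan by per-slope intercept frequency tables built in counting passes plus a builtin first-argmin selection (O(n*distinct-slopes) vs O(n^2); measured faster in a timing run); on inputs outside Pre_progression both Pythons raise ValueError.


-- ===== PORT A =====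
def progression (a : List Int) : List Int :=
  let n : Int := a.length
  let st := (PySem.List.pyRange 0 (n - 1) 1).foldl
    (fun (st : Int × Int × Int) i =>
      let dif := PySem.List.pyGetD a (i + 1) 0 - PySem.List.pyGetD a i 0
      let quantity := (PySem.List.pyRange 0 n 1).foldl
        (fun q j => if PySem.List.pyGetD a j 0 ≠ PySem.List.pyGetD a i 0 + dif * (j - i) then q + 1 else q)
        (0 : Int)
      if quantity < st.1 then (quantity, dif, PySem.List.pyGetD a i 0 - dif * i) else st)
    (n, 0, 0)
  PySem.List.pyRange st.2.2 (st.2.2 + st.2.1 * n) st.2.1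

-- ===== PORT B =====
def progression_alt (a : List Int) : List Int :=
  let n : Int := a.length
  let slopes : PySem.Set Int := PySem.Set.ofList
    ((PySem.List.pyRange 0 (n - 1) 1).map (fun i =>
      PySem.List.pyGetD a (i + 1) 0 - PySem.List.pyGetD a i 0))
  let freq : PySem.Dict Int (PySem.Dict Int Int) := slopes.foldl
    (fun F d => F.insert d
      ((PySem.List.enumerate a).foldl
        (fun c p => c.modify (p.2 - d * p.1) 0 (· + 1)) PySem.Dict.empty))
    PySem.Dict.empty
  match PySem.List.min? (PySem.List.pyRange 0 (n - 1) 1)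
      (fun i =>
        let d := PySem.List.pyGetD a (i + 1) 0 - PySem.List.pyGetD a i 0
        n - (freq.getD d PySem.Dict.empty).getD (PySem.List.pyGetD a i 0 - d * i) 0) with
  | none => []   -- unreachable inside Pre_ (Python: min() of an empty range raises ValueError)
  | some i =>
    let d := PySem.List.pyGetD a (i + 1) 0 - PySem.List.pyGetD a i 0
    let b := PySem.List.pyGetD a i 0 - d * i
    PySem.List.pyRange b (b + d * n) d

-- ===== PRECONDITION & SPEC =====
-- mismatch count of the candidate progression through index i with slope a[i+1]-a[i]
def pvQ (a : List Int) (i : Nat) : Nat :=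
  (PySem.List.pyRange 0 (a.length : Int) 1).countP
    (fun j => decide (PySem.List.pyGetD a j 0 ≠
      PySem.List.pyGetD a (i : Int) 0 +
        (PySem.List.pyGetD a ((i : Int) + 1) 0 - PySem.List.pyGetD a (i : Int) 0) * (j - (i : Int))))
-- Pre_ excludes exactly the inputs where Python A raises ValueError (range() with step 0):
-- lists of length < 2, and lists whose winning candidate — the first index minimizing the
-- mismatch count — has two equal adjacent elements (step 0); B raises ValueError there too.
def Pre_progression (a : List Int) : Prop :=
  2 ≤ a.length ∧ ∃ i < a.length - 1,
    PySem.List.pyGetD a ((i : Int) + 1) 0 ≠ PySem.List.pyGetD a (i : Int) 0 ∧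
    (∀ j < i, pvQ a i < pvQ a j) ∧ (∀ j < a.length - 1, pvQ a i ≤ pvQ a j)
instance (a : List Int) : Decidable (Pre_progression a) := by unfold Pre_progression; infer_instance
def pvWitness_progression : List Int := [1, 2, 4]
def Spec_progression (a : List Int) (out : List Int) : Prop := out = progression_alt a
instance (a : List Int) (out : List Int) : Decidable (Spec_progression a out) := by unfold Spec_progression; infer_instance

-- ===== CLAIM (what is proved, stated in full; the proofs are below) =====
def Claim_equal_progression : Prop := ∀ (a : List Int), Dom_progression a → Pre_progression a → Spec_progression a (progression a)

-- ===== LEMMAS AND PROOFS =====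

-- the table-building fold never touches a key it does not insert
theorem pv_tab_getD_not_mem (f : Int → PySem.Dict Int Int) (S : List Int) (k : Int)
    (hk : k ∉ S) : ∀ F : PySem.Dict Int (PySem.Dict Int Int),
    (S.foldl (fun F d => F.insert d (f d)) F).getD k PySem.Dict.empty = F.getD k PySem.Dict.empty := by
  induction S with
  | nil => intro F; rfl
  | cons x S ih =>
    intro F
    simp only [List.foldl_cons]
    rw [ih (fun h => hk (List.mem_cons_of_mem _ h))]
    exact PySem.Dict.getD_insert_of_ne F _ _ (fun h => hk (h ▸ List.mem_cons_self))

-- over distinct keys, the table lookup returns exactly the value computed for that key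
theorem pv_tab_getD_mem (f : Int → PySem.Dict Int Int) (S : List Int) (k : Int)
    (hnd : S.Nodup) (hk : k ∈ S) : ∀ F : PySem.Dict Int (PySem.Dict Int Int),
    (S.foldl (fun F d => F.insert d (f d)) F).getD k PySem.Dict.empty = f k := by
  induction S with
  | nil => cases hk
  | cons x S ih =>
    intro F
    simp only [List.foldl_cons]
    rcases List.mem_cons.mp hk with h | h
    · subst h
      rw [pv_tab_getD_not_mem f S k (List.nodup_cons.mp hnd).1,
          PySem.Dict.getD_insert_self]
    · exact ih (List.nodup_cons.mp hnd).2 h _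

-- the per-slope counting pass over enumerate(a) is a counter of the residues a[j] - d*j
theorem pv_counter (a : List Int) (d b : Int) :
    ((PySem.List.enumerate a).foldl
      (fun c p => c.modify (p.2 - d * p.1) 0 (· + 1)) (PySem.Dict.empty : PySem.Dict Int Int)).getD b 0
    = ((PySem.List.pyRange 0 (a.length : Int) 1).countP
        (fun j => PySem.List.pyGetD a j 0 - d * j == b) : Nat) := by
  rw [PySem.List.enumerate_eq_map_pyRange a 0, List.foldl_map]
  simp only [PySem.List.len_eq]
  have h := PySem.Dict.getD_foldl_modify_add_one
    ((PySem.List.pyRange 0 (PySem.List.len a) 1).map (fun j => PySem.List.pyGetD a j 0 - d * j))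
    (PySem.Dict.empty) b
  rw [List.foldl_map] at h
  simp only [PySem.List.len_eq] at h
  refine h.trans ?_
  rw [List.count_eq_countP, List.countP_map]
  simp [pysem, Function.comp_def]

-- A's inner quantity loop is the mismatch countP
theorem pv_quantity_countP (a : List Int) (i dif : Int) :
    (PySem.List.pyRange 0 (a.length : Int) 1).foldl
      (fun q j => if PySem.List.pyGetD a j 0 ≠ PySem.List.pyGetD a i 0 + dif * (j - i) then q + 1 else q)
      (0 : Int)
    = ((PySem.List.pyRange 0 (a.length : Int) 1).countP
        (fun j => decide (PySem.List.pyGetD a j 0 ≠ PySem.List.pyGetD a i 0 + dif * (j - i))) : Nat) := by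
  rw [PySem.List.foldl_ite_add_one]
  omega

-- mismatch count + residue match count = n (the two predicates are complementary)
theorem pv_match_mism (a : List Int) (i : Int) :
    ((PySem.List.pyRange 0 (a.length : Int) 1).countP
      (fun j => decide (PySem.List.pyGetD a j 0 ≠ PySem.List.pyGetD a i 0 +
        (PySem.List.pyGetD a (i + 1) 0 - PySem.List.pyGetD a i 0) * (j - i))))
    + ((PySem.List.pyRange 0 (a.length : Int) 1).countP
      (fun j => PySem.List.pyGetD a j 0 - (PySem.List.pyGetD a (i + 1) 0 - PySem.List.pyGetD a i 0) * j
        == PySem.List.pyGetD a i 0 - (PySem.List.pyGetD a (i + 1) 0 - PySem.List.pyGetD a i 0) * i))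
    = a.length := by
  set d := PySem.List.pyGetD a (i + 1) 0 - PySem.List.pyGetD a i 0 with hd
  have hco : (PySem.List.pyRange 0 (a.length : Int) 1).countP
      (fun j => PySem.List.pyGetD a j 0 - d * j == PySem.List.pyGetD a i 0 - d * i)
      = (PySem.List.pyRange 0 (a.length : Int) 1).countP
      (fun j => decide ¬(decide (PySem.List.pyGetD a j 0 ≠ PySem.List.pyGetD a i 0 + d * (j - i))) = true) := by
    apply List.countP_congr
    intro j _
    by_cases h : PySem.List.pyGetD a j 0 = PySem.List.pyGetD a i 0 + d * (j - i)
    · have h2 : PySem.List.pyGetD a j 0 - d * j = PySem.List.pyGetD a i 0 - d * i := by nlinarith [h]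
      simp only [h, decide_not]
      simp
      linarith [h2]
    · have h2 : PySem.List.pyGetD a j 0 - d * j ≠ PySem.List.pyGetD a i 0 - d * i := by
        intro h3; exact h (by nlinarith [h3])
      simp [h, h2]
  have hsplit := List.length_eq_countP_add_countP
    (fun j => decide (PySem.List.pyGetD a j 0 ≠ PySem.List.pyGetD a i 0 + d * (j - i)))
    (l := PySem.List.pyRange 0 (a.length : Int) 1)
  have hlen : (PySem.List.pyRange 0 (a.length : Int) 1).length = a.length := by
    rw [PySem.List.length_pyRange_one]; omega
  omega

-- A's running-best fold, once seeded with a candidate, is the first-argmin fold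
theorem pv_foldA (q : Int → Int) (g : Int → Int × Int) :
    ∀ (l : List Int) (m : Int),
    l.foldl (fun (st : Int × Int × Int) i => if q i < st.1 then (q i, g i) else st) (q m, g m)
    = (fun w => (q w, g w)) (l.foldl (fun acc i => if q i < q acc then i else acc) m) := by
  intro l
  induction l with
  | nil => intro m; rfl
  | cons x l ih =>
    intro m
    simp only [List.foldl_cons]
    by_cases h : q x < q m
    · simp only [if_pos h]; exact ih x
    · simp only [if_neg h]; exact ih m

-- min? with a key agreeing with q on the seed and the rest of the list is the same first-argmin fold
theorem pv_minfold (q q' : Int → Int) (f : Option Int → Int → Option Int)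
    (hf : ∀ m x, f (some m) x = if q' x < q' m then some x else some m) :
    ∀ (l : List Int) (m : Int), q' m = q m → (∀ x ∈ l, q' x = q x) →
    l.foldl f (some m)
    = some (l.foldl (fun acc i => if q i < q acc then i else acc) m) := by
  intro l
  induction l with
  | nil => intro m _ _; rfl
  | cons x l ih =>
    intro m hm hl
    simp only [List.foldl_cons, hf, hm, hl x List.mem_cons_self]
    by_cases h : q x < q m
    · simp only [if_pos h]
      exact ih x (hl x List.mem_cons_self) (fun y hy => hl y (List.mem_cons_of_mem _ hy))
    · simp only [if_neg h]
      exact ih m hm (fun y hy => hl y (List.mem_cons_of_mem _ hy))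

-- proof-only abbreviations: mismatch count, first-argmin winner, the common output
def pvDif (a : List Int) (i : Int) : Int :=
  PySem.List.pyGetD a (i + 1) 0 - PySem.List.pyGetD a i 0
def pvA1 (a : List Int) (i : Int) : Int :=
  PySem.List.pyGetD a i 0 - pvDif a i * i
def pvQI (a : List Int) (i : Int) : Int :=
  ((PySem.List.pyRange 0 (a.length : Int) 1).countP
    (fun j => decide (PySem.List.pyGetD a j 0 ≠
      PySem.List.pyGetD a i 0 + pvDif a i * (j - i))) : Nat)
def pvWinner (a : List Int) : Int :=
  (PySem.List.pyRange (0 + 1) ((a.length : Int) - 1) 1).foldl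
    (fun acc i => if pvQI a i < pvQI a acc then i else acc) 0
def pvOut (a : List Int) : List Int :=
  PySem.List.pyRange (pvA1 a (pvWinner a))
    (pvA1 a (pvWinner a) + pvDif a (pvWinner a) * (a.length : Int)) (pvDif a (pvWinner a))
def pvFreq (a : List Int) : PySem.Dict Int (PySem.Dict Int Int) :=
  (PySem.Set.ofList ((PySem.List.pyRange 0 ((a.length : Int) - 1) 1).map (fun i =>
      PySem.List.pyGetD a (i + 1) 0 - PySem.List.pyGetD a i 0))).foldl
    (fun F d => F.insert d
      ((PySem.List.enumerate a).foldl
        (fun c p => c.modify (p.2 - d * p.1) 0 (· + 1)) PySem.Dict.empty))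
    PySem.Dict.empty

-- a candidate's mismatch count is strictly below n (position i itself always matches)
theorem pv_q_lt (a : List Int) (i : Int) (h0 : 0 ≤ i) (h1 : i < (a.length : Int)) :
    pvQI a i < (a.length : Int) := by
  unfold pvQI
  have hmem : i ∈ PySem.List.pyRange 0 (a.length : Int) 1 :=
    PySem.List.mem_pyRange_one.mpr ⟨h0, h1⟩
  have hle := List.countP_le_length
    (p := fun j => decide (PySem.List.pyGetD a j 0 ≠
      PySem.List.pyGetD a i 0 + pvDif a i * (j - i)))
    (l := PySem.List.pyRange 0 (a.length : Int) 1)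
  have hne : (PySem.List.pyRange 0 (a.length : Int) 1).countP
      (fun j => decide (PySem.List.pyGetD a j 0 ≠
        PySem.List.pyGetD a i 0 + pvDif a i * (j - i)))
      ≠ (PySem.List.pyRange 0 (a.length : Int) 1).length := by
    intro h
    have := (List.countP_eq_length.mp h) i hmem
    simp at this
  have hlen : (PySem.List.pyRange 0 (a.length : Int) 1).length = a.length := by
    rw [PySem.List.length_pyRange_one]; omega
  omega

-- B's key computes the same mismatch count as A's inner loop, for any in-range candidate
theorem pv_key_eq (a : List Int) (i : Int) (h0 : 0 ≤ i) (h1 : i < (a.length : Int) - 1) :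
    (a.length : Int) - ((pvFreq a).getD (pvDif a i) PySem.Dict.empty).getD (pvA1 a i) 0
    = pvQI a i := by
  unfold pvFreq pvQI pvA1 pvDif
  have hmem : (PySem.List.pyGetD a (i + 1) 0 - PySem.List.pyGetD a i 0)
      ∈ PySem.Set.ofList ((PySem.List.pyRange 0 ((a.length : Int) - 1) 1).map (fun i =>
        PySem.List.pyGetD a (i + 1) 0 - PySem.List.pyGetD a i 0)) :=
    (PySem.Set.mem_ofList _ _).mpr
      (List.mem_map.mpr ⟨i, PySem.List.mem_pyRange_one.mpr ⟨h0, h1⟩, rfl⟩)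
  rw [pv_tab_getD_mem (fun d => (PySem.List.enumerate a).foldl
        (fun c p => c.modify (p.2 - d * p.1) 0 (· + 1)) PySem.Dict.empty)
      _ _ (PySem.Set.nodup_ofList _) hmem]
  rw [pv_counter]
  have := pv_match_mism a i
  omega

-- min? of a nonempty list with a key agreeing with q is the first-argmin fold
theorem pv_min?_eq (q q' : Int → Int) (x : Int) (l : List Int)
    (hx : q' x = q x) (hl : ∀ y ∈ l, q' y = q y) :
    PySem.List.min? (x :: l) q'
    = some (l.foldl (fun acc i => if q i < q acc then i else acc) x) := by
  simp only [PySem.List.min?, List.foldl_cons]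
  exact pv_minfold q q' _ (fun m x => rfl) l x hx hl

-- A's port equals the common first-argmin output
theorem pv_A_eq (a : List Int) (h2 : 2 ≤ a.length) : progression a = pvOut a := by
  have hpos : (0 : Int) < (a.length : Int) - 1 := by omega
  unfold progression
  simp only [pv_quantity_countP]
  change PySem.List.pyRange
      (((PySem.List.pyRange 0 ((a.length : Int) - 1) 1).foldl
        (fun (st : Int × Int × Int) i =>
          if pvQI a i < st.1 then (pvQI a i, pvDif a i, pvA1 a i) else st)
        (((a.length : Int)), 0, 0)).2.2)
      (((PySem.List.pyRange 0 ((a.length : Int) - 1) 1).foldl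
        (fun (st : Int × Int × Int) i =>
          if pvQI a i < st.1 then (pvQI a i, pvDif a i, pvA1 a i) else st)
        (((a.length : Int)), 0, 0)).2.2
       + ((PySem.List.pyRange 0 ((a.length : Int) - 1) 1).foldl
        (fun (st : Int × Int × Int) i =>
          if pvQI a i < st.1 then (pvQI a i, pvDif a i, pvA1 a i) else st)
        (((a.length : Int)), 0, 0)).2.1 * (a.length : Int))
      (((PySem.List.pyRange 0 ((a.length : Int) - 1) 1).foldl
        (fun (st : Int × Int × Int) i =>
          if pvQI a i < st.1 then (pvQI a i, pvDif a i, pvA1 a i) else st)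
        (((a.length : Int)), 0, 0)).2.1)
    = pvOut a
  have hF : (PySem.List.pyRange 0 ((a.length : Int) - 1) 1).foldl
        (fun (st : Int × Int × Int) i =>
          if pvQI a i < st.1 then (pvQI a i, pvDif a i, pvA1 a i) else st)
        (((a.length : Int)), 0, 0)
      = (pvQI a (pvWinner a), pvDif a (pvWinner a), pvA1 a (pvWinner a)) := by
    rw [PySem.List.pyRange_one_cons hpos, List.foldl_cons]
    have hc : pvQI a 0 < (((a.length : Int)), (0 : Int), (0 : Int)).1 :=
      pv_q_lt a 0 le_rfl (by omega)
    rw [if_pos hc, pv_foldA (pvQI a) (fun i => (pvDif a i, pvA1 a i))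
      (PySem.List.pyRange (0 + 1) ((a.length : Int) - 1) 1) 0]
    rfl
  rw [hF]
  rfl

-- B's port equals the common first-argmin output
theorem pv_B_eq (a : List Int) (h2 : 2 ≤ a.length) : progression_alt a = pvOut a := by
  have hpos : (0 : Int) < (a.length : Int) - 1 := by omega
  unfold progression_alt
  change (match PySem.List.min? (PySem.List.pyRange 0 ((a.length : Int) - 1) 1)
      (fun i => (a.length : Int) -
        ((pvFreq a).getD (pvDif a i) PySem.Dict.empty).getD (pvA1 a i) 0) with
    | none => []
    | some i => PySem.List.pyRange (pvA1 a i)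
        (pvA1 a i + pvDif a i * (a.length : Int)) (pvDif a i)) = pvOut a
  rw [PySem.List.pyRange_one_cons hpos]
  rw [pv_min?_eq (pvQI a)
      (fun i => (a.length : Int) -
        ((pvFreq a).getD (pvDif a i) PySem.Dict.empty).getD (pvA1 a i) 0)
      0 (PySem.List.pyRange (0 + 1) ((a.length : Int) - 1) 1)
      (pv_key_eq a 0 le_rfl (by omega))
      (fun y hy => by
        have hb := PySem.List.mem_pyRange_one.mp hy
        exact pv_key_eq a y (by omega) hb.2)]
  rfl

-- ===== VERDICT (by name: the statement is the Claim_ definition above) =====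
theorem progression_spec : Claim_equal_progression := by
  intro a _ hpre
  obtain ⟨h2, -⟩ := hpre
  unfold Spec_progression
  rw [pv_A_eq a h2, pv_B_eq a h2]
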